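-- pv_equiv track=rewrite | github.com/Gyu-Seok0/CCD_KDD24 | Utils/utils.py | get_train_valid_test_mat_for_new_users
-- ===== SOURCE A (Python) =====
-- def get_train_valid_test_mat_for_new_users(b_total_user, p_total_user, p_train_mat, p_valid_mat, p_test_mat):
--     """
--     Retrieves the train, valid, and test matrices for new users.
--
--     Args:
--         b_total_user (int): The last user_id in the previous data block.
--         p_total_user (int): The last user_id in the current data block. (e.g., )
--         p_train_mat (dict[dict]): Training matrix in the current data block.
--             Example: {user_1: {item_1: 1, ..., item_k: 1}, ..., user_U: {item_1: 1, ..., item_k: 1}}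
--         p_valid_mat (dict[dict]): Validation matrix in the current data block.
--             Example: {user_1: {item_1: 1, ..., item_k: 1}, ..., user_U: {item_1: 1, ..., item_k: 1}}
--         p_test_mat (dict[dict]): Test matrix in the current data block.
--             Example: {user_1: {item_1: 1, ..., item_k: 1}, ..., user_U: {item_1: 1, ..., item_k: 1}}
--
--     Returns:
--         tuple: Contains three dictionaries for new users' train, valid, and test matrices.
--     """
--
--     new_user_train_mat = {}
--     new_user_valid_mat = {}
--     new_user_test_mat = {}
--
--     for new_user_id in range(b_total_user, p_total_user):
--         if new_user_id in p_train_mat.keys():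
--             new_user_train_mat[new_user_id] = p_train_mat[new_user_id]
--         if new_user_id in p_valid_mat.keys():
--             new_user_valid_mat[new_user_id] = p_valid_mat[new_user_id]
--         if new_user_id in p_test_mat.keys():
--             new_user_test_mat[new_user_id] = p_test_mat[new_user_id]
--
--     return new_user_train_mat, new_user_valid_mat, new_user_test_mat
-- ===== SOURCE B (Python) =====
-- def get_train_valid_test_mat_for_new_users(b_total_user, p_total_user, p_train_mat, p_valid_mat, p_test_mat):
--     def pick(mat):
--         return {k: mat[k] for k in sorted(k for k in mat if b_total_user <= k < p_total_user)}
--     return pick(p_train_mat), pick(p_valid_mat), pick(p_test_mat)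
-- ===== Notes on version B (the rewrite author's own statement) =====
-- stated objective: alternative
-- what changed: Instead of one pass over range(b_total_user, p_total_user) probing all three dicts per id, B makes three independent passes: for each dict it filters its own keys to the range, sorts them, and builds the output by a dict comprehension in that sorted order.
import Mathlib
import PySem

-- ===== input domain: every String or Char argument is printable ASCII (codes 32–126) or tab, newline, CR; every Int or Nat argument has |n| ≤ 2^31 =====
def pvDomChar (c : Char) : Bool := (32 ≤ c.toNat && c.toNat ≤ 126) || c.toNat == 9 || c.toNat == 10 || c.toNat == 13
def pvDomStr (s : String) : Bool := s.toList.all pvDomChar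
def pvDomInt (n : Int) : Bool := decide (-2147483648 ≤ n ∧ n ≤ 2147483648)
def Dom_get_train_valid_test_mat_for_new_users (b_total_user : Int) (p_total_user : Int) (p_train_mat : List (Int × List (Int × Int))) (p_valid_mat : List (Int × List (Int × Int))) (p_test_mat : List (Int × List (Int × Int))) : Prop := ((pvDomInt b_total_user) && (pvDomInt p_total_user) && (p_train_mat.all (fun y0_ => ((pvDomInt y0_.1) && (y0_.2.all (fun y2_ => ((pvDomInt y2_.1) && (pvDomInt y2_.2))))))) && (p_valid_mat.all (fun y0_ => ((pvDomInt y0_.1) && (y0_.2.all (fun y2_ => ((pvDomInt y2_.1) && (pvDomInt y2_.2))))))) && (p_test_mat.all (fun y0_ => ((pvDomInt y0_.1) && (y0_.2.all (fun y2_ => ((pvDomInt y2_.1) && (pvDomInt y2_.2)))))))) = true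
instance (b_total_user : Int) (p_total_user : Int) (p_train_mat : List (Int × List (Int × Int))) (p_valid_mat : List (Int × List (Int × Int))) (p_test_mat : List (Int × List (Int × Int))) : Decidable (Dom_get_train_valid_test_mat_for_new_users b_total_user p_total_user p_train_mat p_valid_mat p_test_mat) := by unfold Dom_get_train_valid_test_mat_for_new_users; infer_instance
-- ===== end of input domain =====

-- ===== PORT A =====
-- B replaces A's single range-loop probing three dicts with three independent filter-sort-build passes (alternative decomposition).
-- first-match lookup on an association list (Python dict semantics on the given inputs)
def pvContainsKey (mat : List (Int × List (Int × Int))) (k : Int) : Bool :=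
  mat.any (fun p => p.1 == k)

def pvLookupD (mat : List (Int × List (Int × Int))) (k : Int) : List (Int × Int) :=
  ((mat.find? (fun p => p.1 == k)).map (·.2)).getD []

def get_train_valid_test_mat_for_new_users (b_total_user : Int) (p_total_user : Int) (p_train_mat : List (Int × List (Int × Int))) (p_valid_mat : List (Int × List (Int × Int))) (p_test_mat : List (Int × List (Int × Int))) : (List (Int × List (Int × Int))) × (List (Int × List (Int × Int))) × (List (Int × List (Int × Int))) :=
  let s := (PySem.List.pyRange b_total_user p_total_user 1).foldl
    (fun (acc : PySem.Dict Int (List (Int × Int)) × PySem.Dict Int (List (Int × Int)) × PySem.Dict Int (List (Int × Int))) new_user_id =>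
      ((if pvContainsKey p_train_mat new_user_id then acc.1.insert new_user_id (pvLookupD p_train_mat new_user_id) else acc.1),
       (if pvContainsKey p_valid_mat new_user_id then acc.2.1.insert new_user_id (pvLookupD p_valid_mat new_user_id) else acc.2.1),
       (if pvContainsKey p_test_mat new_user_id then acc.2.2.insert new_user_id (pvLookupD p_test_mat new_user_id) else acc.2.2)))
    (PySem.Dict.empty, PySem.Dict.empty, PySem.Dict.empty)
  (s.1.items, s.2.1.items, s.2.2.items)

-- ===== PORT B =====
-- one pass of Source B's pick(): sort the in-range keys of this dict, then build the dict in that order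
def pvPick (b p : Int) (mat : List (Int × List (Int × Int))) : List (Int × List (Int × Int)) :=
  let ks := PySem.List.sorted ((mat.map (·.1)).filter (fun k => decide (b ≤ k) && decide (k < p))) (fun x => x) false
  (ks.foldl (fun (d : PySem.Dict Int (List (Int × Int))) k => d.insert k (pvLookupD mat k)) PySem.Dict.empty).items

def get_train_valid_test_mat_for_new_users_alt (b_total_user : Int) (p_total_user : Int) (p_train_mat : List (Int × List (Int × Int))) (p_valid_mat : List (Int × List (Int × Int))) (p_test_mat : List (Int × List (Int × Int))) : (List (Int × List (Int × Int))) × (List (Int × List (Int × Int))) × (List (Int × List (Int × Int))) :=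
  (pvPick b_total_user p_total_user p_train_mat,
   pvPick b_total_user p_total_user p_valid_mat,
   pvPick b_total_user p_total_user p_test_mat)

-- ===== PRECONDITION & SPEC =====
-- Pre_ requires each association list to have pairwise-distinct keys: the lists represent Python dicts,
-- whose keys are always distinct, so this excludes no Python input at all (duplicate-key lists are an
-- artefact of the List encoding on which first-match order is accidental).
def Pre_get_train_valid_test_mat_for_new_users (b_total_user : Int) (p_total_user : Int) (p_train_mat : List (Int × List (Int × Int))) (p_valid_mat : List (Int × List (Int × Int))) (p_test_mat : List (Int × List (Int × Int))) : Prop :=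
  (p_train_mat.map (·.1)).Nodup ∧ (p_valid_mat.map (·.1)).Nodup ∧ (p_test_mat.map (·.1)).Nodup
instance (b_total_user : Int) (p_total_user : Int) (p_train_mat : List (Int × List (Int × Int))) (p_valid_mat : List (Int × List (Int × Int))) (p_test_mat : List (Int × List (Int × Int))) : Decidable (Pre_get_train_valid_test_mat_for_new_users b_total_user p_total_user p_train_mat p_valid_mat p_test_mat) := by unfold Pre_get_train_valid_test_mat_for_new_users; infer_instance

def pvWitness_get_train_valid_test_mat_for_new_users : Int × Int × (List (Int × List (Int × Int))) × (List (Int × List (Int × Int))) × (List (Int × List (Int × Int))) :=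
  (1, 3, [(0, [(5, 1)]), (2, [(6, 1)])], [(2, [(7, 1)])], [])

-- ===== PRECONDITION & SPEC (continued: Spec) =====
def Spec_get_train_valid_test_mat_for_new_users (b_total_user : Int) (p_total_user : Int) (p_train_mat : List (Int × List (Int × Int))) (p_valid_mat : List (Int × List (Int × Int))) (p_test_mat : List (Int × List (Int × Int))) (out : (List (Int × List (Int × Int))) × (List (Int × List (Int × Int))) × (List (Int × List (Int × Int)))) : Prop := out = get_train_valid_test_mat_for_new_users_alt b_total_user p_total_user p_train_mat p_valid_mat p_test_mat
instance (b_total_user : Int) (p_total_user : Int) (p_train_mat : List (Int × List (Int × Int))) (p_valid_mat : List (Int × List (Int × Int))) (p_test_mat : List (Int × List (Int × Int))) (out : (List (Int × List (Int × Int))) × (List (Int × List (Int × Int))) × (List (Int × List (Int × Int)))) : Decidable (Spec_get_train_valid_test_mat_for_new_users b_total_user p_total_user p_train_mat p_valid_mat p_test_mat out) := by unfold Spec_get_train_valid_test_mat_for_new_users; infer_instance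

-- ===== CLAIM (what is proved, stated in full; the proofs are below) =====
def Claim_equal_get_train_valid_test_mat_for_new_users : Prop := ∀ (b_total_user : Int) (p_total_user : Int) (p_train_mat : List (Int × List (Int × Int))) (p_valid_mat : List (Int × List (Int × Int))) (p_test_mat : List (Int × List (Int × Int))), Dom_get_train_valid_test_mat_for_new_users b_total_user p_total_user p_train_mat p_valid_mat p_test_mat → Pre_get_train_valid_test_mat_for_new_users b_total_user p_total_user p_train_mat p_valid_mat p_test_mat → Spec_get_train_valid_test_mat_for_new_users b_total_user p_total_user p_train_mat p_valid_mat p_test_mat (get_train_valid_test_mat_for_new_users b_total_user p_total_user p_train_mat p_valid_mat p_test_mat)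

-- ===== LEMMAS AND PROOFS =====

-- A's loop updates its three dicts independently, so it splits into three one-dict folds
theorem pv_foldl_split (t v s : List (Int × List (Int × Int))) (r : List Int)
    (i1 i2 i3 : PySem.Dict Int (List (Int × Int))) :
    r.foldl (fun (acc : PySem.Dict Int (List (Int × Int)) × PySem.Dict Int (List (Int × Int)) × PySem.Dict Int (List (Int × Int))) new_user_id =>
        ((if pvContainsKey t new_user_id then acc.1.insert new_user_id (pvLookupD t new_user_id) else acc.1),
         (if pvContainsKey v new_user_id then acc.2.1.insert new_user_id (pvLookupD v new_user_id) else acc.2.1),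
         (if pvContainsKey s new_user_id then acc.2.2.insert new_user_id (pvLookupD s new_user_id) else acc.2.2)))
      (i1, i2, i3)
      = (r.foldl (fun d k => if pvContainsKey t k then d.insert k (pvLookupD t k) else d) i1,
         r.foldl (fun d k => if pvContainsKey v k then d.insert k (pvLookupD v k) else d) i2,
         r.foldl (fun d k => if pvContainsKey s k then d.insert k (pvLookupD s k) else d) i3) := by
  induction r generalizing i1 i2 i3 with
  | nil => rfl
  | cons a tl ih => simp only [List.foldl_cons]; exact ih _ _ _

theorem pv_containsKey_iff (mat : List (Int × List (Int × Int))) (k : Int) :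
    pvContainsKey mat k = true ↔ k ∈ mat.map (·.1) := by
  simp only [pvContainsKey, List.any_eq_true, beq_iff_eq, List.mem_map]

-- one dict's slice of A's loop equals B's pick
theorem pv_pick_eq (b p : Int) (mat : List (Int × List (Int × Int)))
    (h : (mat.map (·.1)).Nodup) :
    ((PySem.List.pyRange b p 1).foldl
        (fun (d : PySem.Dict Int (List (Int × Int))) k =>
          if pvContainsKey mat k then d.insert k (pvLookupD mat k) else d)
        PySem.Dict.empty).items
      = pvPick b p mat := by
  have hflt_nodup : ((PySem.List.pyRange b p 1).filter (fun k => pvContainsKey mat k)).Nodup :=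
    (PySem.List.nodup_pyRange_one b p).filter _
  have hkeys_nodup : ((mat.map (·.1)).filter (fun k => decide (b ≤ k) && decide (k < p))).Nodup :=
    h.filter _
  have hmem : ∀ a : Int,
      a ∈ (PySem.List.pyRange b p 1).filter (fun k => pvContainsKey mat k)
        ↔ a ∈ (mat.map (·.1)).filter (fun k => decide (b ≤ k) && decide (k < p)) := by
    intro a
    simp only [List.mem_filter, PySem.List.mem_pyRange_one, pv_containsKey_iff,
      Bool.and_eq_true, decide_eq_true_eq]
    tauto
  have hperm : ((PySem.List.pyRange b p 1).filter (fun k => pvContainsKey mat k)).Perm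
      ((mat.map (·.1)).filter (fun k => decide (b ≤ k) && decide (k < p))) := by
    rw [List.perm_ext_iff_of_nodup hflt_nodup hkeys_nodup]; exact hmem
  have hsorted : PySem.List.sorted
        ((mat.map (·.1)).filter (fun k => decide (b ≤ k) && decide (k < p))) (fun x => x) false
      = (PySem.List.pyRange b p 1).filter (fun k => pvContainsKey mat k) :=
    PySem.List.sorted_eq_of_perm_of_pairwise_lt _ _ _ hperm
      ((PySem.List.pairwise_lt_pyRange_one b p).filter _)
  have hfresh : ∀ (l : List Int), l.Nodup →
      (l.foldl (fun (d : PySem.Dict Int (List (Int × Int))) k => d.insert k (pvLookupD mat k))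
          PySem.Dict.empty).items
        = l.map (fun k => (k, pvLookupD mat k)) := by
    intro l hl
    simpa using PySem.Dict.items_foldl_insert_fresh l (fun k => k) (fun k => pvLookupD mat k)
      PySem.Dict.empty (fun a _ => PySem.Dict.contains_empty a) (by simpa using hl)
  rw [← List.foldl_filter, hfresh _ hflt_nodup]
  simp only [pvPick, hsorted, hfresh _ hflt_nodup]

-- ===== VERDICT (by name: the statement is the Claim_ definition above) =====
theorem get_train_valid_test_mat_for_new_users_spec : Claim_equal_get_train_valid_test_mat_for_new_users := by
  intro b p t v s _ hpre
  obtain ⟨h1, h2, h3⟩ := hpre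
  unfold Spec_get_train_valid_test_mat_for_new_users
  simp only [get_train_valid_test_mat_for_new_users, get_train_valid_test_mat_for_new_users_alt,
    pv_foldl_split, pv_pick_eq b p t h1, pv_pick_eq b p v h2, pv_pick_eq b p s h3]
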